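-- pv_equiv track=rewrite | github.com/jialuli3/speechbrain | recipes/wav2vec_kic/extract_wav2vev2_multitask.py | outputs2labels
-- ===== SOURCE A (Python) =====
-- def outputs2labels(predictions_sp,predictions_chn,predictions_fan,predictions_man):
--     dict_map_sp={1:"CHN",2:"FAN",3:"MAN",4:"CXN",0:"SIL"}
--     dict_map_chn={0:"CRY",1:"FUS",2:"BAB"}
--     dict_map_fan={0:"CDS",1:"FAN",2:"LAU",3:"SNG"}
--     dict_map_man={0:"CDS",1:"MAN",2:"LAU",3:"SNG"}
--
--     labels_sp,labels_chn,labels_fan,labels_man=[],[],[],[]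
--
--     for i,pred in enumerate(predictions_sp):
--         if dict_map_sp[pred]=="SIL":
--             labels_sp.append("SIL")
--             labels_chn.append("SIL")
--             labels_fan.append("SIL")
--             labels_man.append("SIL")
--         elif dict_map_sp[pred]=="CHN":
--             labels_sp.append(dict_map_sp[pred])
--             labels_chn.append(dict_map_chn[predictions_chn[i]])
--             labels_fan.append("SIL")
--             labels_man.append("SIL")
--         elif dict_map_sp[pred]=="FAN":
--             labels_sp.append(dict_map_sp[pred])
--             labels_chn.append("SIL")
--             labels_fan.append(dict_map_fan[predictions_fan[i]])
--             labels_man.append("SIL")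
--         elif dict_map_sp[pred]=="MAN":
--             labels_sp.append(dict_map_sp[pred])
--             labels_chn.append("SIL")
--             labels_fan.append("SIL")
--             labels_man.append(dict_map_man[predictions_man[i]])
--         else:
--             labels_sp.append(dict_map_sp[pred])
--             labels_chn.append("SIL")
--             labels_fan.append("SIL")
--             labels_man.append("SIL")
--     return labels_sp,labels_chn,labels_fan,labels_man
-- ===== SOURCE B (Python) =====
-- def outputs2labels(predictions_sp, predictions_chn, predictions_fan, predictions_man):
--     dict_map_sp = {1: "CHN", 2: "FAN", 3: "MAN", 4: "CXN", 0: "SIL"}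
--     dict_map_chn = {0: "CRY", 1: "FUS", 2: "BAB"}
--     dict_map_fan = {0: "CDS", 1: "FAN", 2: "LAU", 3: "SNG"}
--     dict_map_man = {0: "CDS", 1: "MAN", 2: "LAU", 3: "SNG"}
--
--     labels_sp = [dict_map_sp[p] for p in predictions_sp]
--     labels_chn = [dict_map_chn[predictions_chn[i]] if l == "CHN" else "SIL"
--                   for i, l in enumerate(labels_sp)]
--     labels_fan = [dict_map_fan[predictions_fan[i]] if l == "FAN" else "SIL"
--                   for i, l in enumerate(labels_sp)]
--     labels_man = [dict_map_man[predictions_man[i]] if l == "MAN" else "SIL"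
--                   for i, l in enumerate(labels_sp)]
--     return labels_sp, labels_chn, labels_fan, labels_man
-- ===== Notes on version B (the rewrite author's own statement) =====
-- stated objective: simpler
-- what changed: Replaces A's single interleaved loop carrying four growing accumulator lists and a five-way if/elif chain by one unconditional comprehension for labels_sp plus one small independent comprehension per channel column keyed off labels_sp.
import Mathlib
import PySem

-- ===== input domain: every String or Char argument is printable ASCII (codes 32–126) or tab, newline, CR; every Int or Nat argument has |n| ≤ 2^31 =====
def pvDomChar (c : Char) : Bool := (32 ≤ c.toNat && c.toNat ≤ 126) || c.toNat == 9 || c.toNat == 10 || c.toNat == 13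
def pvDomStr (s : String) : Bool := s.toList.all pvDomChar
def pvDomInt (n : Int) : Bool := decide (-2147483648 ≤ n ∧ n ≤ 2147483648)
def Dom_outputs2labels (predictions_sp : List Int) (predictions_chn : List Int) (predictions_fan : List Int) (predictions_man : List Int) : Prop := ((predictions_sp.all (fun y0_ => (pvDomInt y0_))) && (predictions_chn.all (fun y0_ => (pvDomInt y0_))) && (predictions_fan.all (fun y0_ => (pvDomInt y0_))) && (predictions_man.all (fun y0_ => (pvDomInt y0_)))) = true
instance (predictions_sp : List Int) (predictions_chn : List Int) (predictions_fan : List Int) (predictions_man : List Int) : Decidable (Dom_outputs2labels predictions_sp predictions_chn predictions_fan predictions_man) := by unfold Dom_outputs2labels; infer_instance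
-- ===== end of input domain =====

-- B rebuilds the result as one unconditional map for labels_sp followed by one independent
-- comprehension per channel column, instead of A's single interleaved four-accumulator loop
-- (objective: simpler; same O(n) cost).

-- ===== PORT A =====
-- The four literal dicts of both Pythons, totalized as functions; exact on the keys the dicts
-- carry — any other key raises KeyError in Python and is excluded by Pre_ (the "" / "SIL"
-- default is never reached inside Pre_).
def mapSp (p : Int) : String :=
  if p = 1 then "CHN" else if p = 2 then "FAN" else if p = 3 then "MAN"
  else if p = 4 then "CXN" else "SIL"

def mapChn (p : Int) : String :=
  if p = 0 then "CRY" else if p = 1 then "FUS" else if p = 2 then "BAB" else ""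

def mapFan (p : Int) : String :=
  if p = 0 then "CDS" else if p = 1 then "FAN" else if p = 2 then "LAU" else if p = 3 then "SNG" else ""

def mapMan (p : Int) : String :=
  if p = 0 then "CDS" else if p = 1 then "MAN" else if p = 2 then "LAU" else if p = 3 then "SNG" else ""

-- One iteration of A's loop body: the same if/elif chain, appending to the four lists.
-- predictions_chn[i] etc. are ported as PySem.List.pyGetD with default -1 (IndexError is
-- excluded by Pre_; -1 is no dict key, so the default never names a real label).
def stepA (chn fan man : List Int)
    (acc : List String × List String × List String × List String) (ip : Int × Int) :
    List String × List String × List String × List String :=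
  let (i, pred) := ip
  let (ls, lc, lf, lm) := acc
  if mapSp pred = "SIL" then
    (ls ++ ["SIL"], lc ++ ["SIL"], lf ++ ["SIL"], lm ++ ["SIL"])
  else if mapSp pred = "CHN" then
    (ls ++ [mapSp pred], lc ++ [mapChn (PySem.List.pyGetD chn i (-1))], lf ++ ["SIL"], lm ++ ["SIL"])
  else if mapSp pred = "FAN" then
    (ls ++ [mapSp pred], lc ++ ["SIL"], lf ++ [mapFan (PySem.List.pyGetD fan i (-1))], lm ++ ["SIL"])
  else if mapSp pred = "MAN" then
    (ls ++ [mapSp pred], lc ++ ["SIL"], lf ++ ["SIL"], lm ++ [mapMan (PySem.List.pyGetD man i (-1))])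
  else
    (ls ++ [mapSp pred], lc ++ ["SIL"], lf ++ ["SIL"], lm ++ ["SIL"])

def outputs2labels (predictions_sp : List Int) (predictions_chn : List Int) (predictions_fan : List Int) (predictions_man : List Int) : List String × List String × List String × List String :=
  (PySem.List.enumerate predictions_sp 0).foldl
    (stepA predictions_chn predictions_fan predictions_man) ([], [], [], [])

-- ===== PORT B =====
def outputs2labels_alt (predictions_sp : List Int) (predictions_chn : List Int) (predictions_fan : List Int) (predictions_man : List Int) : List String × List String × List String × List String :=
  let labels_sp := predictions_sp.map mapSp
  let labels_chn := (PySem.List.enumerate labels_sp 0).map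
    (fun il => if il.2 = "CHN" then mapChn (PySem.List.pyGetD predictions_chn il.1 (-1)) else "SIL")
  let labels_fan := (PySem.List.enumerate labels_sp 0).map
    (fun il => if il.2 = "FAN" then mapFan (PySem.List.pyGetD predictions_fan il.1 (-1)) else "SIL")
  let labels_man := (PySem.List.enumerate labels_sp 0).map
    (fun il => if il.2 = "MAN" then mapMan (PySem.List.pyGetD predictions_man il.1 (-1)) else "SIL")
  (labels_sp, labels_chn, labels_fan, labels_man)

-- ===== PRECONDITION & SPEC =====
-- Exactly the inputs on which the Python A returns: every speech prediction is a key of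
-- dict_map_sp (0..4), and wherever it selects a channel the channel list is long enough and
-- its entry is a key of that channel's dict (otherwise Python raises KeyError/IndexError).
def Pre_outputs2labels (predictions_sp : List Int) (predictions_chn : List Int) (predictions_fan : List Int) (predictions_man : List Int) : Prop :=
  ∀ i : Nat, ∀ _h : i < predictions_sp.length,
    predictions_sp[i] ∈ ([0, 1, 2, 3, 4] : List Int) ∧
    (predictions_sp[i] = 1 → i < predictions_chn.length ∧
      PySem.List.pyGetD predictions_chn (i : Int) (-1) ∈ ([0, 1, 2] : List Int)) ∧
    (predictions_sp[i] = 2 → i < predictions_fan.length ∧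
      PySem.List.pyGetD predictions_fan (i : Int) (-1) ∈ ([0, 1, 2, 3] : List Int)) ∧
    (predictions_sp[i] = 3 → i < predictions_man.length ∧
      PySem.List.pyGetD predictions_man (i : Int) (-1) ∈ ([0, 1, 2, 3] : List Int))
instance (predictions_sp : List Int) (predictions_chn : List Int) (predictions_fan : List Int) (predictions_man : List Int) : Decidable (Pre_outputs2labels predictions_sp predictions_chn predictions_fan predictions_man) := by unfold Pre_outputs2labels; infer_instance

def pvWitness_outputs2labels : List Int × List Int × List Int × List Int :=
  ([0, 1, 2, 3, 4], [9, 2, 9, 9, 9], [9, 9, 3, 9, 9], [9, 9, 9, 1, 9])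

def Spec_outputs2labels (predictions_sp : List Int) (predictions_chn : List Int) (predictions_fan : List Int) (predictions_man : List Int) (out : List String × List String × List String × List String) : Prop := out = outputs2labels_alt predictions_sp predictions_chn predictions_fan predictions_man
instance (predictions_sp : List Int) (predictions_chn : List Int) (predictions_fan : List Int) (predictions_man : List Int) (out : List String × List String × List String × List String) : Decidable (Spec_outputs2labels predictions_sp predictions_chn predictions_fan predictions_man out) := by unfold Spec_outputs2labels; infer_instance

-- ===== CLAIM (what is proved, stated in full; the proofs are below) =====
def Claim_equal_outputs2labels : Prop := ∀ (predictions_sp : List Int) (predictions_chn : List Int) (predictions_fan : List Int) (predictions_man : List Int), Dom_outputs2labels predictions_sp predictions_chn predictions_fan predictions_man → Pre_outputs2labels predictions_sp predictions_chn predictions_fan predictions_man → Spec_outputs2labels predictions_sp predictions_chn predictions_fan predictions_man (outputs2labels predictions_sp predictions_chn predictions_fan predictions_man)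

-- ===== LEMMAS AND PROOFS =====

-- Column of B read off the enumerated sp-labels, abstracted over the active label / map / list.
def colB (lab : String) (f : Int → String) (preds : List Int) (il : Int × String) : String :=
  if il.2 = lab then f (PySem.List.pyGetD preds il.1 (-1)) else "SIL"

-- A's fold from an arbitrary start index and accumulators equals B's four independent passes,
-- each appended to its accumulator.  (No precondition needed: both ports use the same
-- totalized maps and the same defaulted indexing.)
lemma foldA_eq (chn fan man : List Int) (sp : List Int) (i : Int)
    (ls lc lf lm : List String) :
    (PySem.List.enumerate sp i).foldl (stepA chn fan man) (ls, lc, lf, lm) =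
      (ls ++ sp.map mapSp,
       lc ++ (PySem.List.enumerate (sp.map mapSp) i).map (colB "CHN" mapChn chn),
       lf ++ (PySem.List.enumerate (sp.map mapSp) i).map (colB "FAN" mapFan fan),
       lm ++ (PySem.List.enumerate (sp.map mapSp) i).map (colB "MAN" mapMan man)) := by
  induction sp generalizing i ls lc lf lm with
  | nil => simp [PySem.List.enumerate_nil]
  | cons p rest ih =>
      rw [List.map_cons, PySem.List.enumerate_cons, PySem.List.enumerate_cons,
        List.foldl_cons, List.map_cons, List.map_cons, List.map_cons]
      by_cases h1 : mapSp p = "SIL" <;>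
        by_cases h2 : mapSp p = "CHN" <;>
        by_cases h3 : mapSp p = "FAN" <;>
        by_cases h4 : mapSp p = "MAN" <;>
        simp_all [stepA, colB]

-- ===== VERDICT (by name: the statement is the Claim_ definition above) =====
theorem outputs2labels_spec : Claim_equal_outputs2labels := by
  intro sp chn fan man _hDom _hPre
  show _ = _
  rw [outputs2labels, foldA_eq]
  simp [outputs2labels_alt, colB]
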